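-- pv_equiv track=rewrite | github.com/joaotomazio/python-word_sleuth | main.py | grelha
-- ===== SOURCE A (Python) =====
-- def grelha(lst):
--     '''grelha : lista de strings -> grelha
--        grelha(lst) devolve a propria lista introduzida, se esta for uma lista de strings de igual tamanho, levantando um erro em caso contrario'''
--
--     if not isinstance(lst, list): #verifica se o argumento e uma lista
--         raise ValueError("grelha: argumentos invalidos")
--
--     elif lst == []: #verifica se a lista e vazia
--         raise ValueError("grelha: argumentos invalidos")
--
--     else:
--         for i in lst: #verifica se todos os elementos da lista sao strings
--             if not isinstance(i, str):
--                 raise ValueError("grelha: argumentos invalidos")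
--
--         for i in range(len(lst) - 1): #verifica se todas as strings tem o mesmo tamanho
--             if len(lst[i]) != len(lst[i + 1]):
--                 raise ValueError("grelha: argumentos invalidos")
--
--     return lst
-- ===== SOURCE B (Python) =====
-- def grelha(lst):
--     '''grelha : lista de strings -> grelha
--        grelha(lst) devolve a propria lista, se for uma lista nao vazia de strings de igual tamanho'''
--     if not isinstance(lst, list) or lst == []:
--         raise ValueError("grelha: argumentos invalidos")
--     if not isinstance(lst[0], str):
--         raise ValueError("grelha: argumentos invalidos")
--     n = len(lst[0])
--     # reconstruct the sublist of valid elements; the input is valid iff it equals that sublist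
--     if lst != [s for s in lst if isinstance(s, str) and len(s) == n]:
--         raise ValueError("grelha: argumentos invalidos")
--     return lst
-- ===== Notes on version B (the rewrite author's own statement) =====
-- stated objective: alternative
-- what changed: Replaces A's two staged validation loops (an isinstance loop, then an indexed loop comparing adjacent pairs of lengths) with a reconstruct-and-compare check: build the sublist of elements that are strings of the head's length and demand the whole list equals it.
import Mathlib
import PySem

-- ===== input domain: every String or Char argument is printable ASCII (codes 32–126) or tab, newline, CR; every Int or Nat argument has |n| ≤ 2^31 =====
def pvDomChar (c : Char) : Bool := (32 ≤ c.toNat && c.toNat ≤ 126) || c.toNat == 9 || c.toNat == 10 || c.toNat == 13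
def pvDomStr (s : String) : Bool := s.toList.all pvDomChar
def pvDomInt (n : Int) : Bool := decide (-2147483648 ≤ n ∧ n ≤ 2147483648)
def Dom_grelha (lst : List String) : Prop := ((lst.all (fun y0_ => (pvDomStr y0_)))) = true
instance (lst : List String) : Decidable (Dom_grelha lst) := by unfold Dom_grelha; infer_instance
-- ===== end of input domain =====

-- B replaces A's two staged validation loops with a reconstruct-and-compare check: filter the
-- list to the elements of the head's length and demand the whole list equals the filtered list.
-- Both raise ValueError on the excluded inputs; the isinstance checks are trivially true under List String.

-- ===== PORT A =====
-- raise paths return [] (unreachable inside Pre_grelha); indices in the range loop are always valid, so pyGetD is exact there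
def grelha (lst : List String) : List String :=
  if lst = [] then []
  else if (PySem.List.pyRange 0 (PySem.List.len lst - 1) 1).all (fun i =>
      PySem.Str.len (PySem.List.pyGetD lst i "") == PySem.Str.len (PySem.List.pyGetD lst (i + 1) "")) then lst
  else []

-- ===== PORT B =====
-- raise paths return []; the list comprehension is List.filter, the != comparison is the outer if
def grelha_alt (lst : List String) : List String :=
  match lst with
  | [] => []
  | h :: t =>
    let n := PySem.Str.len h
    if (h :: t).filter (fun s => PySem.Str.len s == n) = h :: t then h :: t else []

-- ===== PRECONDITION & SPEC =====
-- Pre_ excludes exactly the inputs on which the Python A raises ValueError: the empty list and lists with unequal string lengths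
def Pre_grelha (lst : List String) : Prop :=
  lst ≠ [] ∧ ∀ s ∈ lst, PySem.Str.len s = PySem.Str.len (lst.headD "")
instance (lst : List String) : Decidable (Pre_grelha lst) := by unfold Pre_grelha; infer_instance
def pvWitness_grelha : List String := (["ab", "cd", "ef"])

def Spec_grelha (lst : List String) (out : List String) : Prop := out = grelha_alt lst
instance (lst : List String) (out : List String) : Decidable (Spec_grelha lst out) := by unfold Spec_grelha; infer_instance

-- ===== CLAIM (what is proved, stated in full; the proofs are below) =====
def Claim_equal_grelha : Prop := ∀ (lst : List String), Dom_grelha lst → Pre_grelha lst → Spec_grelha lst (grelha lst)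

-- ===== LEMMAS AND PROOFS =====

lemma grelha_eq_self (lst : List String) (h : Pre_grelha lst) : grelha lst = lst := by
  obtain ⟨hne, hlen⟩ := h
  unfold grelha
  rw [if_neg hne, if_pos]
  rw [List.all_eq_true]
  intro i hi
  rw [PySem.List.mem_pyRange_one] at hi
  obtain ⟨h0, h1⟩ := hi
  simp only [PySem.List.len_eq] at h1
  have hget : ∀ j : Int, 0 ≤ j → j < (lst.length : Int) →
      PySem.Str.len (PySem.List.pyGetD lst j "") = PySem.Str.len (lst.headD "") := by
    intro j hj0 hjl
    rw [PySem.List.pyGetD_of_nonneg (h := hj0)]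
    have hjn : j.toNat < lst.length := by omega
    rw [List.getD_eq_getElem _ _ hjn]
    exact hlen _ (List.getElem_mem hjn)
  have e1 := hget i h0 (by omega)
  have e2 := hget (i + 1) (by omega) (by omega)
  have e := e1.trans e2.symm
  simp only [PySem.Str.len_eq, Nat.cast_inj] at e
  simp [e]

lemma grelha_alt_eq_self (lst : List String) (h : Pre_grelha lst) : grelha_alt lst = lst := by
  obtain ⟨hne, hlen⟩ := h
  match lst with
  | [] => exact absurd rfl hne
  | h0 :: t =>
    show (if (h0 :: t).filter (fun s => PySem.Str.len s == PySem.Str.len h0) = h0 :: t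
          then h0 :: t else []) = h0 :: t
    rw [if_pos]
    apply List.filter_eq_self.mpr
    intro s hs
    simpa using hlen s (by simpa using hs)

-- ===== VERDICT (by name: the statement is the Claim_ definition above) =====
theorem grelha_spec : Claim_equal_grelha := by
  intro lst _ hpre
  unfold Spec_grelha
  rw [grelha_eq_self lst hpre, grelha_alt_eq_self lst hpre]
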